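-- pv_equiv track=rewrite | github.com/Acerlations/Pendue | main.py | letter_finder
-- ===== SOURCE A (Python) =====
-- def letter_finder(word, propo):
--     word = list(word)
--     liste_word_found = []
--     for i in word:
--         if i == propo:
--             i = propo
--             liste_word_found.append(i)
--     return liste_word_found
-- ===== SOURCE B (Python) =====
-- def letter_finder(word, propo):
--     # A one-character string element of word can equal propo only if propo is
--     # itself one character; then the matches are exactly the substring
--     # occurrences of propo, counted via str.split.
--     if len(propo) != 1:
--         return []
--     return [propo] * (len(word.split(propo)) - 1)
-- ===== Notes on version B (the rewrite author's own statement) =====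
-- stated objective: alternative
-- what changed: B has no per-character filter loop at all: it case-splits on len(propo) (a multi-character or empty propo can never equal a single character, so the result is []) and otherwise counts occurrences via word.split(propo) and builds the result by list replication.
import Mathlib
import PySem

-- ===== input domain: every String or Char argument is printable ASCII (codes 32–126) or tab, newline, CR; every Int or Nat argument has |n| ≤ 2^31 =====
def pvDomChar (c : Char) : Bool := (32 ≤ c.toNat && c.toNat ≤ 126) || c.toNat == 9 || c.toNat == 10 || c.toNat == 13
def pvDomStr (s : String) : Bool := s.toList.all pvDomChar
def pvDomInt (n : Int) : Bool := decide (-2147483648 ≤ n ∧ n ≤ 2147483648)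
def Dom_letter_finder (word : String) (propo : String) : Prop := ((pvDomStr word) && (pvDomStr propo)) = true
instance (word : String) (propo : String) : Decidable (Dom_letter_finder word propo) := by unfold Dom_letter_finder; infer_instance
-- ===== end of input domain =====

-- B replaces A's per-character filter loop by a case split on len(propo) plus a substring split: matches exist only for a one-character propo, and then they are exactly the split occurrences (alternative decomposition; return value only).


-- ===== PORT A =====
-- list(word): each element is a one-character string; the loop appends on a branch
def letter_finder (word : String) (propo : String) : List String :=
  (word.toList.map (fun c => String.ofList [c])).foldl
    (fun liste_word_found i =>
      if i = propo then liste_word_found ++ [propo] else liste_word_found) []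

-- ===== PORT B =====
-- word.split(propo) with len(propo) = 1 never raises, so split? is some here; getD [] only discharges the option
def letter_finder_alt (word : String) (propo : String) : List String :=
  if PySem.Str.len propo ≠ 1 then []
  else List.replicate (((PySem.Str.split? word propo).getD []).length - 1) propo

-- ===== PRECONDITION & SPEC =====
def Spec_letter_finder (word : String) (propo : String) (out : List String) : Prop := out = letter_finder_alt word propo
instance (word : String) (propo : String) (out : List String) : Decidable (Spec_letter_finder word propo out) := by unfold Spec_letter_finder; infer_instance

-- ===== CLAIM (what is proved, stated in full; the proofs are below) =====
def Claim_equal_letter_finder : Prop := ∀ (word : String) (propo : String), Dom_letter_finder word propo → Spec_letter_finder word propo (letter_finder word propo)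

-- ===== LEMMAS AND PROOFS =====
theorem pv_ofList_single_inj (c p : Char) : String.ofList [c] = String.ofList [p] ↔ c = p := by
  constructor
  · intro h; have := congrArg String.toList h; simpa using this
  · intro h; rw [h]

theorem pv_foldl_count (propo : String) (l : List String) (acc : List String) :
    l.foldl (fun liste_word_found i =>
      if i = propo then liste_word_found ++ [propo] else liste_word_found) acc
      = acc ++ List.replicate (List.count propo l) propo := by
  induction l generalizing acc with
  | nil => simp
  | cons x xs ih =>
    simp only [List.foldl_cons, ih, List.count_cons]
    by_cases h : x = propo
    · simp only [h, beq_self_eq_true, if_true, List.append_assoc, List.singleton_append]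
      rw [← List.replicate_succ, List.replicate_succ']
    · have h2 : ¬ (x == propo) := by simpa using h
      simp [h, h2]

theorem pv_count_zero (propo : String) (cs : List Char) (h : propo.toList.length ≠ 1) :
    List.count propo (cs.map (fun c => String.ofList [c])) = 0 := by
  rw [List.count_eq_zero]
  intro hmem
  rcases List.mem_map.mp hmem with ⟨c, _, hc⟩
  apply h
  rw [← hc]
  simp

theorem pv_count_map (p : Char) (cs : List Char) :
    List.count (String.ofList [p]) (cs.map (fun c => String.ofList [c])) = List.count p cs := by
  exact List.count_map_of_injective cs (fun c => String.ofList [c])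
    (fun a b hab => (pv_ofList_single_inj a b).mp hab) p

theorem pv_splitOn_go_length (p : Char) :
    ∀ (fuel : Nat) (l cur : List Char) (acc : List (List Char)), l.length < fuel →
    (PySem.Chars.splitOn.go [p] fuel l cur acc).length = acc.length + 1 + List.count p l := by
  intro fuel
  induction fuel with
  | zero => intro l cur acc h; omega
  | succ n ih =>
    intro l cur acc h
    cases l with
    | nil => simp [PySem.Chars.splitOn.go]
    | cons c rest =>
      by_cases hc : c = p
      · have hpre : [p].isPrefixOf (c :: rest) = true := by simp [List.isPrefixOf, hc]
        rw [PySem.Chars.splitOn.go]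
        simp only [hpre, if_true, List.length_singleton, List.drop_one, List.tail_cons]
        rw [ih rest [] (cur.reverse :: acc) (by simpa using Nat.lt_of_succ_lt_succ h)]
        simp [hc]
        omega
      · have hpre : [p].isPrefixOf (c :: rest) = false := by
          simp [List.isPrefixOf]
          exact fun hb => absurd (eq_comm.mp (beq_iff_eq.mp (by simpa using hb))) hc
        rw [PySem.Chars.splitOn.go]
        simp only [hpre, Bool.false_eq_true, if_false]
        rw [ih rest (c :: cur) acc (by simpa using Nat.lt_of_succ_lt_succ h)]
        have : (c == p) = false := by simpa using hc
        simp [List.count_cons, this]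

theorem pv_splitOn_length (p : Char) (cs : List Char) :
    (PySem.Chars.splitOn cs [p]).length = List.count p cs + 1 := by
  unfold PySem.Chars.splitOn
  rw [pv_splitOn_go_length p (cs.length + 1) cs [] [] (by omega)]
  simp only [List.length_nil]
  omega

-- ===== VERDICT (by name: the statement is the Claim_ definition above) =====
theorem letter_finder_spec : Claim_equal_letter_finder := by
  intro word propo _
  unfold Spec_letter_finder letter_finder letter_finder_alt
  rw [pv_foldl_count]
  by_cases h1 : propo.toList.length = 1
  · have hlen : ¬ (PySem.Str.len propo ≠ 1) := by simp [PySem.Str.len, h1]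
    rw [if_neg hlen]
    obtain ⟨p, hp⟩ : ∃ p, propo.toList = [p] := by
      cases hl : propo.toList with
      | nil => simp [hl] at h1
      | cons a t =>
        cases t with
        | nil => exact ⟨a, rfl⟩
        | cons b u => simp [hl] at h1
    have hpropo : propo = String.ofList [p] := by
      rw [← hp, String.ofList_toList]
    have hsplit : PySem.Str.split? word propo = some ((PySem.Chars.splitOn word.toList [p]).map String.ofList) := by
      simp [PySem.Str.split?, PySem.Chars.split?, hp]
    rw [hsplit]
    simp only [Option.getD_some, List.length_map, pv_splitOn_length, Nat.add_sub_cancel,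
      List.nil_append]
    rw [hpropo, pv_count_map]
  · have hlen : PySem.Str.len propo ≠ 1 := by
      simp only [PySem.Str.len]
      intro hc
      exact h1 (by exact_mod_cast hc)
    rw [if_pos hlen, pv_count_zero propo word.toList h1]
    simp
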